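-- pv_equiv track=rewrite | github.com/gnailuy/code_forces | acw/poj_3187.py | add_down
-- ===== SOURCE A (Python) =====
-- def add_down(seq):
--     new_seq = seq[:]
--     while True:
--         n = len(new_seq)
--         if 1 == n:
--             return new_seq[0]
--
--         next_seq = []
--         for i in range(n-1):
--             next_seq.append(new_seq[i] + new_seq[i+1])
--
--         new_seq = next_seq
-- ===== SOURCE B (Python) =====
-- def add_down(seq):
--     # One pass: result = sum of C(n-1, i) * seq[i], binomial coefficient kept incrementally.
--     n = len(seq)
--     total = 0
--     c = 1
--     for i, x in enumerate(seq):
--         total += c * x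
--         c = c * (n - 1 - i) // (i + 1)
--     return total
-- ===== Notes on version B (the rewrite author's own statement) =====
-- stated objective: faster
-- what changed: Replaces the quadratic repeated adjacent-summing loop by the closed form sum of C(n-1,i)*seq[i], computed in one pass with an incrementally updated binomial coefficient.
import Mathlib
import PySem

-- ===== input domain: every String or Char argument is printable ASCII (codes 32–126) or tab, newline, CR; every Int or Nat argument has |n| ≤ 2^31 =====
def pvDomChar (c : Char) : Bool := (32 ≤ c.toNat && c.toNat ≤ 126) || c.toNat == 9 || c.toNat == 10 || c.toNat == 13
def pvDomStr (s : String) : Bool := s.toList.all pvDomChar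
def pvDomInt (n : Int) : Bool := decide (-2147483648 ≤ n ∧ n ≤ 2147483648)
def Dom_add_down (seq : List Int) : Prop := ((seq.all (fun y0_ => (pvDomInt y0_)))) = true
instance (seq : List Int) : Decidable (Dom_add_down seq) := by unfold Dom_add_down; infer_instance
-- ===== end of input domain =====

-- B replaces A's quadratic repeated adjacent-summing by the closed form Σ C(n-1,i)·seq[i],
-- maintained in one pass with an incrementally updated binomial coefficient (objective: faster).

-- ===== PORT A =====
-- inner 'for i in range(n-1): next_seq.append(new_seq[i] + new_seq[i+1])' as structural recursion
def addStep : List Int → List Int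
  | a :: b :: t => (a + b) :: addStep (b :: t)
  | _ => []

-- the 'while True' loop; fuel = initial length is a totality guard only (one row is
-- consumed per iteration, so fuel = length always suffices on nonempty input;
-- on [] the Python loops forever, excluded by Pre_)
def addLoop : Nat → List Int → Int
  | 0, _ => 0
  | f + 1, xs => if xs.length = 1 then xs.headD 0 else addLoop f (addStep xs)

def add_down (seq : List Int) : Int := addLoop seq.length seq

-- ===== PORT B =====
def add_down_alt (seq : List Int) : Int :=
  let n : Int := seq.length
  ((PySem.List.enumerate seq 0).foldl
    (fun (st : Int × Int) (p : Int × Int) =>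
      (st.1 + st.2 * p.2, PySem.Int.floordiv (st.2 * (n - 1 - p.1)) (p.1 + 1)))
    (0, 1)).1

-- ===== PRECONDITION & SPEC =====
-- Pre_ excludes the empty list, on which A's while-loop never terminates (it returns nothing).
def Pre_add_down (seq : List Int) : Prop := seq ≠ []
instance (seq : List Int) : Decidable (Pre_add_down seq) := by unfold Pre_add_down; infer_instance

def pvWitness_add_down : List Int := ([3, 1, 2, 4, 5])

def Spec_add_down (seq : List Int) (out : Int) : Prop := out = add_down_alt seq
instance (seq : List Int) (out : Int) : Decidable (Spec_add_down seq out) := by unfold Spec_add_down; infer_instance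

-- ===== CLAIM (what is proved, stated in full; the proofs are below) =====
def Claim_equal_add_down : Prop := ∀ (seq : List Int), Dom_add_down seq → Pre_add_down seq → Spec_add_down seq (add_down seq)

-- ===== LEMMAS AND PROOFS =====

-- weighted sum Σ_j C(m, i+j) * xs[j]
def wsumAux (m : Nat) : Nat → List Int → Int
  | _, [] => 0
  | i, x :: t => (Nat.choose m i : Int) * x + wsumAux m (i + 1) t

theorem len_addStep : ∀ xs : List Int, (addStep xs).length = xs.length - 1 := by
  intro xs
  match xs with
  | [] => simp [addStep]
  | [a] => simp [addStep]
  | a :: b :: t => simp [addStep, len_addStep (b :: t)]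

theorem step_wsum : ∀ (rest : List Int) (m : Nat) (a : Int) (i : Nat),
    wsumAux m i (addStep (a :: rest)) + (Nat.choose m (i + rest.length) : Int) * rest.getLastD a
      = wsumAux (m + 1) (i + 1) rest + (Nat.choose m i : Int) * a := by
  intro rest
  induction rest with
  | nil => intro m a i; simp [addStep, wsumAux]
  | cons b t ih =>
    intro m a i
    have h := ih m b (i + 1)
    simp only [addStep, wsumAux, List.getLastD_cons, List.length_cons]
    have harr : i + (t.length + 1) = (i + 1) + t.length := by omega
    rw [harr]
    have hp : (Nat.choose (m + 1) (i + 1) : Int)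
        = (Nat.choose m i : Int) + (Nat.choose m (i + 1) : Int) := by
      rw [← Nat.cast_add, ← Nat.choose_succ_succ]
    linear_combination h - b * hp

theorem wsum_step (a : Int) (rest : List Int) (h : rest ≠ []) :
    wsumAux (rest.length - 1) 0 (addStep (a :: rest))
      = wsumAux rest.length 0 (a :: rest) := by
  obtain ⟨m, hm⟩ : ∃ m, rest.length = m + 1 := by
    cases rest with
    | nil => exact absurd rfl h
    | cons x t => exact ⟨t.length, by simp⟩
  have key := step_wsum rest m a 0
  rw [hm]
  simp only [Nat.add_sub_cancel]
  have hz : Nat.choose m (0 + rest.length) = 0 := by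
    rw [hm]; exact Nat.choose_eq_zero_of_lt (by omega)
  rw [hz] at key
  simp only [Nat.cast_zero, zero_mul, add_zero] at key
  simp only [wsumAux, Nat.choose_zero_right, Nat.cast_one, one_mul] at *
  linarith [key]

theorem loop_wsum : ∀ (fuel : Nat) (xs : List Int), xs ≠ [] → xs.length ≤ fuel →
    addLoop fuel xs = wsumAux (xs.length - 1) 0 xs := by
  intro fuel
  induction fuel with
  | zero => intro xs hne hl; cases xs with
    | nil => exact absurd rfl hne
    | cons a t => simp at hl
  | succ f ih =>
    intro xs hne hl
    cases xs with
    | nil => exact absurd rfl hne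
    | cons a t =>
      by_cases h1 : (a :: t).length = 1
      · have ht : t = [] := by cases t with
          | nil => rfl
          | cons b u => simp at h1
        subst ht
        simp [addLoop, wsumAux]
      · have ht : t ≠ [] := by
          intro h; subst h; simp at h1
        have hlen2 : 2 ≤ (a :: t).length := by
          cases t with
          | nil => exact absurd rfl ht
          | cons b u => simp only [List.length_cons]; omega
        have hsne : addStep (a :: t) ≠ [] := by
          have hls := len_addStep (a :: t)
          intro hcontra
          rw [hcontra] at hls
          simp only [List.length_nil, List.length_cons] at hls hlen2
          omega
        have hsl : (addStep (a :: t)).length ≤ f := by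
          rw [len_addStep]
          simp only [List.length_cons] at hl ⊢
          omega
        have := ih (addStep (a :: t)) hsne hsl
        rw [len_addStep] at this
        simp only [addLoop, if_neg h1]
        rw [this]
        have h2 : (a :: t).length - 1 - 1 = t.length - 1 := by simp
        rw [h2]
        have h3 : (a :: t).length - 1 = t.length := by simp
        rw [h3]
        exact wsum_step a t ht

-- incremental binomial coefficient update is exact
theorem coeff_update (N i : Nat) :
    PySem.Int.floordiv ((Nat.choose N i : Int) * ((N : Int) - (i : Int))) ((i : Int) + 1)
      = (Nat.choose N (i + 1) : Int) := by
  by_cases h : i ≤ N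
  · have hc : (N : Int) - (i : Int) = ((N - i : Nat) : Int) := by omega
    have hd : ((i : Int) + 1) = ((i + 1 : Nat) : Int) := by push_cast; ring
    rw [hc, hd, ← Nat.cast_mul]
    have hmul : Nat.choose N i * (N - i) = Nat.choose N (i + 1) * (i + 1) :=
      (Nat.choose_succ_right_eq N i).symm
    rw [hmul, PySem.Int.floordiv_natCast]
    congr 1
    exact Nat.mul_div_cancel _ (by omega)
  · have h1 : Nat.choose N i = 0 := Nat.choose_eq_zero_of_lt (by omega)
    have h2 : Nat.choose N (i + 1) = 0 := Nat.choose_eq_zero_of_lt (by omega)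
    rw [h1, h2]
    simp only [Nat.cast_zero, zero_mul]
    rw [PySem.Int.floordiv_eq_ediv_of_pos (by positivity)]
    simp

theorem fold_inv (n : Int) (N : Nat) (hn : n - 1 = (N : Int)) :
    ∀ (xs : List Int) (i : Nat) (t : Int),
    ((PySem.List.enumerate xs (i : Int)).foldl
      (fun (st : Int × Int) (p : Int × Int) =>
        (st.1 + st.2 * p.2, PySem.Int.floordiv (st.2 * (n - 1 - p.1)) (p.1 + 1)))
      (t, (Nat.choose N i : Int))).1 = t + wsumAux N i xs := by
  intro xs
  induction xs with
  | nil => intro i t; simp [PySem.List.enumerate_nil, wsumAux]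
  | cons x rest ih =>
    intro i t
    rw [PySem.List.enumerate_cons]
    simp only [List.foldl_cons]
    have hc : n - 1 - (i : Int) = (N : Int) - (i : Int) := by omega
    rw [hc, coeff_update N i]
    have hcast : (i : Int) + 1 = ((i + 1 : Nat) : Int) := by push_cast; ring
    rw [hcast]
    rw [ih (i + 1) (t + (Nat.choose N i : Int) * x)]
    simp only [wsumAux]
    ring

theorem alt_eq_wsum (seq : List Int) (h : seq ≠ []) :
    add_down_alt seq = wsumAux (seq.length - 1) 0 seq := by
  unfold add_down_alt
  have hlen : 1 ≤ seq.length := by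
    cases seq with
    | nil => exact absurd rfl h
    | cons a t => simp
  have hn : (seq.length : Int) - 1 = ((seq.length - 1 : Nat) : Int) := by omega
  have := fold_inv (seq.length : Int) (seq.length - 1) hn seq 0 0
  simp only [Nat.cast_zero, Nat.choose_zero_right, Nat.cast_one, zero_add] at this
  exact this

-- ===== VERDICT (by name: the statement is the Claim_ definition above) =====
theorem add_down_spec : Claim_equal_add_down := by
  intro seq _ hpre
  unfold Spec_add_down add_down
  rw [alt_eq_wsum seq hpre]
  exact loop_wsum seq.length seq hpre le_rfl
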